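-- pv_equiv track=rewrite | github.com/nikulin-anton/python-contest | contest/part_3/beautiful_array.py | get_beautiful
-- ===== SOURCE A (Python) =====
-- def get_beautiful(array, length, x):
--     dp = [[0, 0, 0]]
--     max_value = 0
--
--     for i in range(length):
--         normal = max(dp[-1][0] + array[i], array[i], 0)
--         multiple = max(dp[-1][1] + array[i] * x, dp[-1][0] + array[i] * x)
--         end_x = max(dp[-1][1] + array[i], dp[-1][2] + array[i])
--
--         inner_max = max(normal, multiple, end_x)
--         max_value = inner_max if inner_max > max_value else max_value
--
--         dp.append([normal, multiple, end_x])
--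
--     return max_value
-- ===== SOURCE B (Python) =====
-- def get_beautiful(array, length, x):
--     p = q = min_p = best_a = best_b = ans = 0
--     for i in range(length):
--         a = array[i]
--         p += a
--         q += a * x
--         min_p = min(min_p, p)
--         normal = p - min_p
--         multiple = q + best_a
--         end_x = p + best_b
--         ans = max(ans, normal, multiple, end_x)
--         best_a = max(best_a, normal - q)
--         best_b = max(best_b, multiple - p)
--     return ans
-- ===== Notes on version B (the rewrite author's own statement) =====
-- stated objective: alternative
-- what changed: Replaces A's growing dp table of (normal, multiple, end_x) state triples by a single pass over prefix sums of array and x*array, maintaining a running minimum prefix and two running maxima of prefix-sum differences from which each candidate is a difference of prefix sums.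
import Mathlib
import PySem

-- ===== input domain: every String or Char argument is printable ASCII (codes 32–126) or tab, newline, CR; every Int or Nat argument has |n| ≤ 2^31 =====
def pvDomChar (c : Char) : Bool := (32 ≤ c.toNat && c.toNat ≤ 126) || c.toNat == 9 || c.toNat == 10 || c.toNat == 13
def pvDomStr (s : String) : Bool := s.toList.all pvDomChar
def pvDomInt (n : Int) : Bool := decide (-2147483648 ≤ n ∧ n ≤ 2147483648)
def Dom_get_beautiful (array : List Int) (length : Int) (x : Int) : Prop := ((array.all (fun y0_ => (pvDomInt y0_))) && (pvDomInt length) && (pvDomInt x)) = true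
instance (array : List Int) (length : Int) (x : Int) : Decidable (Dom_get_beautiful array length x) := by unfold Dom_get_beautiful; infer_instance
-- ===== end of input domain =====

-- B replaces A's growing dp table of state triples by prefix sums with running
-- minima/maxima, so each step is O(1) arithmetic on six scalars (objective: alternative).

-- ===== PORT A =====
-- loop body of A: reads dp[-1], appends the new triple, updates max_value
def stepA (array : List Int) (x : Int) (st : List (Int × Int × Int) × Int) (i : Int) :
    List (Int × Int × Int) × Int :=
  let l := PySem.List.pyGetD st.1 (-1) (0, 0, 0)       -- dp[-1]; dp is never empty
  let a := PySem.List.pyGetD array i 0                 -- array[i]; Pre_ keeps i in range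
  let normal := max (max (l.1 + a) a) 0
  let multiple := max (l.2.1 + a * x) (l.1 + a * x)
  let end_x := max (l.2.1 + a) (l.2.2 + a)
  let inner := max (max normal multiple) end_x
  (st.1 ++ [(normal, multiple, end_x)], if inner > st.2 then inner else st.2)

def get_beautiful (array : List Int) (length : Int) (x : Int) : Int :=
  ((PySem.List.pyRange 0 length 1).foldl (stepA array x) ([(0, 0, 0)], 0)).2

-- ===== PORT B =====
-- loop body of B: state (p, q, min_p, best_a, best_b, ans)
def stepB (array : List Int) (x : Int) (st : Int × Int × Int × Int × Int × Int) (i : Int) :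
    Int × Int × Int × Int × Int × Int :=
  match st with
  | (p0, q0, mp0, bA0, bB0, ans0) =>
    let a := PySem.List.pyGetD array i 0               -- array[i]; Pre_ keeps i in range
    let p := p0 + a
    let q := q0 + a * x
    let mp := min mp0 p
    let normal := p - mp
    let multiple := q + bA0
    let end_x := p + bB0
    (p, q, mp, max bA0 (normal - q), max bB0 (multiple - p),
     max (max (max ans0 normal) multiple) end_x)

def get_beautiful_alt (array : List Int) (length : Int) (x : Int) : Int :=
  ((PySem.List.pyRange 0 length 1).foldl (stepB array x) (0, 0, 0, 0, 0, 0)).2.2.2.2.2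

-- ===== PRECONDITION & SPEC =====
-- Python A raises IndexError when length > len(array); exactly those inputs are excluded.
def Pre_get_beautiful (array : List Int) (length : Int) (x : Int) : Prop :=
  length ≤ (array.length : Int)
instance (array : List Int) (length : Int) (x : Int) : Decidable (Pre_get_beautiful array length x) := by unfold Pre_get_beautiful; infer_instance

def pvWitness_get_beautiful : List Int × Int × Int := ([1, -2, 3, -4], 4, -3)

def Spec_get_beautiful (array : List Int) (length : Int) (x : Int) (out : Int) : Prop := out = get_beautiful_alt array length x
instance (array : List Int) (length : Int) (x : Int) (out : Int) : Decidable (Spec_get_beautiful array length x out) := by unfold Spec_get_beautiful; infer_instance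

-- ===== CLAIM (what is proved, stated in full; the proofs are below) =====
def Claim_equal_get_beautiful : Prop := ∀ (array : List Int) (length : Int) (x : Int), Dom_get_beautiful array length x → Pre_get_beautiful array length x → Spec_get_beautiful array length x (get_beautiful array length x)

-- ===== LEMMAS AND PROOFS =====

-- Loop invariant: A's last dp triple (n, m, e) and B's six scalars are linked by
-- n = p - mp, mp ≤ p, bA = max m n - q, bB = max e m - p, and the two running maxima agree.
set_option maxHeartbeats 1000000 in
lemma loop_eq (array : List Int) (x : Int) (l : List Int)
    (dp0 : List (Int × Int × Int)) (n m e mvA mvB p q mp bA bB : Int)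
    (hn : n = p - mp) (hmp : mp ≤ p)
    (hA : bA = max m n - q) (hB : bB = max e m - p) (hmv : mvA = mvB) :
    (l.foldl (stepA array x) (dp0 ++ [(n, m, e)], mvA)).2
      = (l.foldl (stepB array x) (p, q, mp, bA, bB, mvB)).2.2.2.2.2 := by
  induction l generalizing dp0 n m e mvA mvB p q mp bA bB with
  | nil => simpa using hmv
  | cons i t ih =>
    simp only [List.foldl_cons, stepA, stepB, PySem.List.pyGetD_neg_one_append_singleton]
    generalize PySem.List.pyGetD array i 0 = a
    generalize a * x = ax
    subst hmv
    have hn' : max (max (n + a) a) 0 = p + a - min mp (p + a) := by omega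
    have hm' : max (m + ax) (n + ax) = q + ax + bA := by omega
    have he' : max (m + a) (e + a) = p + a + bB := by omega
    rw [hn', hm', he']
    apply ih
    · omega
    · omega
    · omega
    · omega
    · split <;> omega

-- ===== VERDICT (by name: the statement is the Claim_ definition above) =====
theorem get_beautiful_spec : Claim_equal_get_beautiful := by
  intro array length x _ _
  unfold Spec_get_beautiful get_beautiful get_beautiful_alt
  have h := loop_eq array x (PySem.List.pyRange 0 length 1) [] 0 0 0 0 0 0 0 0 0 0
    (by omega) (by omega) (by omega) (by omega) rfl
  simpa using h
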